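-- pv_equiv track=rewrite | github.com/JohnSmithDev/ISFDB-Tools | isfdb_utils.py | generate_variant_titles
-- ===== SOURCE A (Python) =====
-- BOGUS_PREFIXES = ['The ']
--
-- BOGUS_SUFFIXES = [': A Novel', ' (Boxed)', ' (series)']
--
-- def generate_variant_titles(original_title):
--     """
--     Return a list of variant titles, based on removing any possibly unnecessary
--     prefixes for suffixes.
--     """
--     variants = set([original_title])
--     prev_len = 0
--
--     while len(variants) != prev_len:
--         prev_len = len(variants)
--         to_add = set() # can't update variants whilst iterating over it
--         for title in variants:
--             for prefix in BOGUS_PREFIXES: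
--                 if title.startswith(prefix):
--                     clean = title[len(prefix):]
--                     to_add.add(clean)
--             for suffix in BOGUS_SUFFIXES:
--                 if title.endswith(suffix):
--                     clean = title[:-len(suffix)]
--                     to_add.add(clean)
--         variants.update(to_add)
--     return variants
-- ===== SOURCE B (Python) =====
-- BOGUS_PREFIXES = ['The ']
--
-- BOGUS_SUFFIXES = [': A Novel', ' (Boxed)', ' (series)']
--
-- def _stripped(title):
--     """All single-step strips of a title, prefixes first."""
--     return ([title[len(p):] for p in BOGUS_PREFIXES if title.startswith(p)]
--             + [title[:-len(s)] for s in BOGUS_SUFFIXES if title.endswith(s)])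
--
-- def generate_variant_titles(original_title):
--     """
--     Frontier BFS: each round expands only the variants discovered in the
--     previous round, instead of re-scanning the whole growing set to a fixpoint.
--     """
--     seen = {original_title}
--     pending = [original_title]
--     while pending:
--         nxt = []
--         for title in pending:
--             for clean in _stripped(title):
--                 if clean not in seen:
--                     seen.add(clean)
--                     nxt.append(clean)
--         pending = nxt
--     return seen
-- ===== Notes on version B (the rewrite author's own statement) =====
-- stated objective: alternative
-- what changed: Replaces the rescan-until-fixpoint outer loop (which re-scans the entire growing set every round and rebuilds a to_add set) with a frontier BFS: each round expands only the variants discovered in the previous round, kid variants being produced by a separate single-step comprehension helper, so no title is ever expanded twice.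
import Mathlib
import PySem

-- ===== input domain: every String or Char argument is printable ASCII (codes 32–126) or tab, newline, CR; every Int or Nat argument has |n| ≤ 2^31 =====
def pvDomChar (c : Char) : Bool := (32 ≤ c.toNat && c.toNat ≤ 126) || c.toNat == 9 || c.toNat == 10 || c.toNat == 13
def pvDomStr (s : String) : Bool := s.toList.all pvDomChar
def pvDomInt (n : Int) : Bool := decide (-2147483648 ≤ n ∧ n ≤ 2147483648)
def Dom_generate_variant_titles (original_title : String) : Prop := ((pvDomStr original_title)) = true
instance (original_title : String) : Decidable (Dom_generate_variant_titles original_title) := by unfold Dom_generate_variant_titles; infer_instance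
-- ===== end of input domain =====

-- B replaces A's rescan-until-fixpoint rounds with a frontier BFS: each round expands only the
-- newly discovered variants (a separate single-step helper produces the stripped forms);
-- same returned set of variant titles.

def pvBogusPrefixes : List String := ["The "]

def pvBogusSuffixes : List String := [": A Novel", " (Boxed)", " (series)"]

-- ===== PORT A =====
-- inner body of A's 'for title in variants' loop: add every stripped form of `title` to `to_add`
def pvCollectA (to_add : PySem.Set String) (title : String) : PySem.Set String :=
  let to_add := pvBogusPrefixes.foldl (fun acc pre =>
      if PySem.Str.startswith title pre then
        PySem.Set.add acc (PySem.Str.slice title (some (PySem.Str.len pre)) none)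
      else acc) to_add
  pvBogusSuffixes.foldl (fun acc suf =>
      if PySem.Str.endswith title suf then
        PySem.Set.add acc (PySem.Str.slice title none (some (-(PySem.Str.len suf))))
      else acc) to_add

-- 'while len(variants) != prev_len'; fuel is a proven-sufficient termination bound
def pvLoopA : Nat → PySem.Set String → Nat → PySem.Set String
  | 0, variants, _ => variants
  | fuel + 1, variants, prev_len =>
      if variants.length ≠ prev_len then
        pvLoopA fuel
          (PySem.Set.update variants (variants.foldl pvCollectA (PySem.Set.empty : PySem.Set String)))
          variants.length
      else variants

def generate_variant_titles (original_title : String) : List String :=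
  pvLoopA ((original_title.toList.length + 1) * (original_title.toList.length + 1) + 1)
    (PySem.Set.ofList [original_title]) 0

-- ===== PORT B =====
-- Source B's _stripped: the two list comprehensions, concatenated (prefix strips first)
def pvStripped (title : String) : List String :=
  (pvBogusPrefixes.filter (fun p => PySem.Str.startswith title p)).map
      (fun p => PySem.Str.slice title (some (PySem.Str.len p)) none)
  ++ (pvBogusSuffixes.filter (fun s => PySem.Str.endswith title s)).map
      (fun s => PySem.Str.slice title none (some (-(PySem.Str.len s))))

-- body of Source B's innermost 'if clean not in seen' over the state (seen, nxt)
def pvStepB (st : PySem.Set String × List String) (clean : String) :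
    PySem.Set String × List String :=
  if PySem.Set.contains st.1 clean then st else (st.1 ++ [clean], st.2 ++ [clean])

-- one pass of Source B's 'for title in pending' body: returns (new seen, nxt)
def pvRoundB (seen : PySem.Set String) (pending : List String) :
    PySem.Set String × List String :=
  pending.foldl (fun st title => (pvStripped title).foldl pvStepB st) (seen, [])

-- the (≤ 4) stripped forms A and B both generate from one title, in generation order
def pvKids (title : String) : List String :=
  (if PySem.Str.startswith title "The " then [PySem.Str.slice title (some 4) none] else []) ++
  ((if PySem.Str.endswith title ": A Novel" then [PySem.Str.slice title none (some (-9))] else []) ++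
  ((if PySem.Str.endswith title " (Boxed)" then [PySem.Str.slice title none (some (-8))] else []) ++
  (if PySem.Str.endswith title " (series)" then [PySem.Str.slice title none (some (-9))] else [])))

lemma pvStripped_eq_kids (x : String) : pvStripped x = pvKids x := by
  simp only [pvStripped, pvKids, pvBogusPrefixes, pvBogusSuffixes, List.filter_cons,
    List.filter_nil]
  split_ifs <;>
    simp [show ("The ").length = 4 from rfl, show (": A Novel").length = 9 from rfl,
      show (" (Boxed)").length = 8 from rfl, show (" (series)").length = 9 from rfl]

-- termination support for the while-loop: one BFS round strictly shrinks the
-- maximal title length of the frontier (every kid is ≥ 4 characters shorter)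
def pvMaxLen (l : List String) : Nat := l.foldr (fun s m => max s.toList.length m) 0

def pvMeasure (l : List String) : Nat := if l.isEmpty then 0 else pvMaxLen l + 1

lemma pvLe_maxLen {x : String} {l : List String} (h : x ∈ l) :
    x.toList.length ≤ pvMaxLen l := by
  induction l with
  | nil => cases h
  | cons c l ih =>
      rcases List.mem_cons.mp h with rfl | h'
      · simp [pvMaxLen]
      · simp only [pvMaxLen, List.foldr] at *
        exact le_trans (ih h') (le_max_right _ _)

lemma pvMaxLen_le {l : List String} {m : Nat} (h : ∀ x ∈ l, x.toList.length ≤ m) :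
    pvMaxLen l ≤ m := by
  induction l with
  | nil => simp [pvMaxLen]
  | cons c l ih =>
      simp only [pvMaxLen, List.foldr, max_le_iff]
      exact ⟨h c (by simp), ih (fun x hx => h x (by simp [hx]))⟩

lemma pvStripped_len {x p : String} (h : x ∈ pvStripped p) :
    x.toList.length + 4 ≤ p.toList.length := by
  rw [pvStripped_eq_kids] at h
  simp only [pvKids, List.mem_append] at h
  have e4 : PySem.List.slice p.toList (some (4 : Int)) none = p.toList.drop 4 := by
    have := PySem.List.slice_from_natCast p.toList 4
    simpa using this
  have e9 : PySem.List.slice p.toList none (some (-9 : Int)) =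
      p.toList.take (p.toList.length - 9) :=
    PySem.List.slice_to_neg_ofNat p.toList 9 (by norm_num)
  have e8 : PySem.List.slice p.toList none (some (-8 : Int)) =
      p.toList.take (p.toList.length - 8) :=
    PySem.List.slice_to_neg_ofNat p.toList 8 (by norm_num)
  rcases h with h | h | h | h <;> rw [List.mem_ite_nil_right] at h <;>
    obtain ⟨hc, h⟩ := h <;> rw [List.mem_singleton] at h <;> subst h
  · have hpre : ("The ").toList <+: p.toList := by
      apply (PySem.Chars.startswith_iff _ _).mp
      rw [← PySem.Str.startswith_eq]
      exact hc
    have h4 : 4 ≤ p.toList.length := by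
      have := hpre.length_le
      simpa using this
    simp only [PySem.Str.toList_slice, PySem.Chars.slice_eq_listSlice, e4, List.length_drop]
    omega
  · have hsuf : (": A Novel").toList <:+ p.toList := by
      apply (PySem.Chars.endswith_iff _ _).mp
      rw [← PySem.Str.endswith_eq]
      exact hc
    have h9 : 9 ≤ p.toList.length := by
      have := hsuf.length_le
      simpa using this
    simp only [PySem.Str.toList_slice, PySem.Chars.slice_eq_listSlice, e9, List.length_take]
    omega
  · have hsuf : (" (Boxed)").toList <:+ p.toList := by
      apply (PySem.Chars.endswith_iff _ _).mp
      rw [← PySem.Str.endswith_eq]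
      exact hc
    have h8 : 8 ≤ p.toList.length := by
      have := hsuf.length_le
      simpa using this
    simp only [PySem.Str.toList_slice, PySem.Chars.slice_eq_listSlice, e8, List.length_take]
    omega
  · have hsuf : (" (series)").toList <:+ p.toList := by
      apply (PySem.Chars.endswith_iff _ _).mp
      rw [← PySem.Str.endswith_eq]
      exact hc
    have h9 : 9 ≤ p.toList.length := by
      have := hsuf.length_le
      simpa using this
    simp only [PySem.Str.toList_slice, PySem.Chars.slice_eq_listSlice, e9, List.length_take]
    omega

lemma pvFoldStep_snd_mem {x : String} (l : List String) :
    ∀ st : PySem.Set String × List String,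
    x ∈ (l.foldl pvStepB st).2 → x ∈ st.2 ∨ x ∈ l := by
  induction l with
  | nil => intro st h; exact Or.inl h
  | cons c l ih =>
      intro st h
      rcases ih (pvStepB st c) h with h' | h'
      · unfold pvStepB at h'
        split_ifs at h'
        · exact Or.inl h'
        · rcases List.mem_append.mp h' with h'' | h''
          · exact Or.inl h''
          · exact Or.inr (by simp at h''; simp [h''])
      · exact Or.inr (by simp [h'])

lemma pvRoundB_snd_mem {x : String} (pending : List String) :
    ∀ st : PySem.Set String × List String,
    x ∈ (pending.foldl (fun st title => (pvStripped title).foldl pvStepB st) st).2 →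
    x ∈ st.2 ∨ ∃ p ∈ pending, x ∈ pvStripped p := by
  induction pending with
  | nil => intro st h; exact Or.inl h
  | cons c l ih =>
      intro st h
      rcases ih _ h with h' | ⟨p, hp, hx⟩
      · rcases pvFoldStep_snd_mem _ st h' with h'' | h''
        · exact Or.inl h''
        · exact Or.inr ⟨c, by simp, h''⟩
      · exact Or.inr ⟨p, by simp [hp], hx⟩

lemma pvRoundB_dec (seen : PySem.Set String) (pending : List String)
    (h : pending ≠ []) : pvMeasure (pvRoundB seen pending).2 < pvMeasure pending := by
  have hpend : pending.isEmpty = false := by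
    cases pending with
    | nil => cases h rfl
    | cons a l => rfl
  have hM : pvMeasure pending = pvMaxLen pending + 1 := by
    simp [pvMeasure, hpend]
  set n := (pvRoundB seen pending).2 with hn
  have hmem : ∀ x ∈ n, ∃ p ∈ pending, x ∈ pvStripped p := by
    intro x hx
    rcases pvRoundB_snd_mem pending (seen, []) hx with h' | h'
    · cases (List.not_mem_nil h')
    · exact h'
  by_cases hcn : n = []
  · rw [hM]
    simp [pvMeasure, hcn]
  · obtain ⟨y, hy⟩ := List.exists_mem_of_ne_nil n hcn
    obtain ⟨p, hp, hyp⟩ := hmem y hy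
    have h4 : 4 ≤ pvMaxLen pending :=
      le_trans (by have := pvStripped_len hyp; omega) (pvLe_maxLen hp)
    have hbound : pvMaxLen n ≤ pvMaxLen pending - 1 := by
      apply pvMaxLen_le
      intro x hx
      obtain ⟨q, hq, hxq⟩ := hmem x hx
      have := pvStripped_len hxq
      have := pvLe_maxLen hq
      omega
    have hne : n.isEmpty = false := by simp [hcn]
    have hmeq : pvMeasure n = pvMaxLen n + 1 := by simp [pvMeasure, hne]
    omega

-- Source B's 'while pending' loop, by well-founded recursion on the frontier's max length
def pvLoopBFS (seen : PySem.Set String) (pending : List String) : PySem.Set String :=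
  if _h : pending.isEmpty then seen
  else pvLoopBFS (pvRoundB seen pending).1 (pvRoundB seen pending).2
termination_by pvMeasure pending
decreasing_by
  exact pvRoundB_dec seen pending (by
    cases pending with
    | nil => simp at _h
    | cons a l => exact List.cons_ne_nil a l)

def generate_variant_titles_alt (original_title : String) : List String :=
  pvLoopBFS (PySem.Set.ofList [original_title]) [original_title]

-- ===== PRECONDITION & SPEC =====
def Spec_generate_variant_titles (original_title : String) (out : List String) : Prop := out = generate_variant_titles_alt original_title
instance (original_title : String) (out : List String) : Decidable (Spec_generate_variant_titles original_title out) := by unfold Spec_generate_variant_titles; infer_instance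

-- ===== CLAIM (what is proved, stated in full; the proofs are below) =====
def Claim_equal_generate_variant_titles : Prop := ∀ (original_title : String), Dom_generate_variant_titles original_title → Spec_generate_variant_titles original_title (generate_variant_titles original_title)

-- ===== LEMMAS AND PROOFS =====

lemma pvCollectA_eq_kids (v : PySem.Set String) (x : String) :
    pvCollectA v x = (pvKids x).foldl PySem.Set.add v := by
  have h1 : PySem.Str.len "The " = 4 := by decide
  have h2 : PySem.Str.len ": A Novel" = 9 := by decide
  have h3 : PySem.Str.len " (Boxed)" = 8 := by decide
  have h4 : PySem.Str.len " (series)" = 9 := by decide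
  simp only [pvCollectA, pvKids, pvBogusPrefixes, pvBogusSuffixes, List.foldl, h1, h2, h3, h4]
  split_ifs <;> simp [List.foldl]

-- generic facts about folding Set.add over a list
lemma pvPrefix_foldl_add (l : List String) : ∀ v : PySem.Set String, v <+: l.foldl PySem.Set.add v := by
  induction l with
  | nil => intro v; simp
  | cons c l ih =>
      intro v
      refine List.IsPrefix.trans ?_ (ih (PySem.Set.add v c))
      rw [PySem.Set.add_eq_ite]
      split_ifs <;> simp

lemma pvMem_foldl_add_left {y : String} (l : List String) (v : PySem.Set String)
    (hy : y ∈ v) : y ∈ l.foldl PySem.Set.add v :=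
  (pvPrefix_foldl_add l v).subset hy

lemma pvMem_foldl_add_of_mem {y : String} (l : List String) (v : PySem.Set String)
    (hy : y ∈ l) : y ∈ l.foldl PySem.Set.add v := by
  induction l generalizing v with
  | nil => cases hy
  | cons c l ih =>
      rcases List.mem_cons.mp hy with rfl | hy'
      · exact pvMem_foldl_add_left l _ (by simp [PySem.Set.mem_add])
      · exact ih _ hy'

lemma pvFoldl_add_of_subset {l : List String} {v : PySem.Set String}
    (h : ∀ c ∈ l, c ∈ v) : l.foldl PySem.Set.add v = v := by
  induction l with
  | nil => rfl
  | cons c l ih =>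
      simp only [List.foldl, PySem.Set.add_of_mem (h c (by simp))]
      exact ih (fun c hc => h c (by simp [hc]))

lemma pvMem_of_foldl_add {y : String} {l : List String} {v : PySem.Set String}
    (h : y ∈ l.foldl PySem.Set.add v) : y ∈ v ∨ y ∈ l := by
  induction l generalizing v with
  | nil => exact Or.inl h
  | cons c l ih =>
      rcases ih (v := PySem.Set.add v c) h with hv | hl
      · rcases (PySem.Set.mem_add _ _ _).mp hv with hv | rfl
        · exact Or.inl hv
        · exact Or.inr (by simp)
      · exact Or.inr (by simp [hl])

lemma pvNodup_foldl_add (l : List String) (v : PySem.Set String) (hv : v.Nodup) :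
    (l.foldl PySem.Set.add v).Nodup := by
  induction l generalizing v with
  | nil => exact hv
  | cons c l ih => exact ih _ (PySem.Set.nodup_add _ _ hv)

lemma pvUpdate_add (v s : PySem.Set String) (c : String) :
    PySem.Set.update v (PySem.Set.add s c) = PySem.Set.add (PySem.Set.update v s) c := by
  by_cases hc : c ∈ s
  · rw [PySem.Set.add_of_mem hc, PySem.Set.add_of_mem ((PySem.Set.mem_update _ _ _).mpr (Or.inr hc))]
  · rw [PySem.Set.add_of_not_mem hc, PySem.Set.update_append, PySem.Set.update_cons,
      PySem.Set.update_nil]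

lemma pvUpdate_foldl_add (l : List String) : ∀ v s : PySem.Set String,
    PySem.Set.update v (l.foldl PySem.Set.add s) = l.foldl PySem.Set.add (PySem.Set.update v s) := by
  induction l with
  | nil => intro v s; rfl
  | cons c l ih =>
      intro v s
      simp only [List.foldl, ih, pvUpdate_add]

-- the same facts lifted to pvCollectA
lemma pvPrefix_collect (v : PySem.Set String) (x : String) : v <+: pvCollectA v x := by
  rw [pvCollectA_eq_kids]; exact pvPrefix_foldl_add _ v

lemma pvPrefix_foldl_collect (l : List String) : ∀ v : PySem.Set String,
    v <+: l.foldl pvCollectA v := by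
  induction l with
  | nil => intro v; simp
  | cons x l ih => intro v; exact (pvPrefix_collect v x).trans (ih _)

lemma pvKids_subset_collect {c : String} (v : PySem.Set String) (x : String)
    (hc : c ∈ pvKids x) : c ∈ pvCollectA v x := by
  rw [pvCollectA_eq_kids]; exact pvMem_foldl_add_of_mem _ _ hc

lemma pvCollect_of_processed {v : PySem.Set String} {x : String}
    (h : ∀ c ∈ pvKids x, c ∈ v) : pvCollectA v x = v := by
  rw [pvCollectA_eq_kids]; exact pvFoldl_add_of_subset h

lemma pvFoldl_collect_of_processed {l : List String} {v : PySem.Set String}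
    (h : ∀ x ∈ l, ∀ c ∈ pvKids x, c ∈ v) : l.foldl pvCollectA v = v := by
  induction l with
  | nil => rfl
  | cons x l ih =>
      simp only [List.foldl, pvCollect_of_processed (h x (by simp))]
      exact ih (fun x hx => h x (by simp [hx]))

lemma pvFoldlSat {x c : String} {l : List String} (v : PySem.Set String)
    (hx : x ∈ l) (hc : c ∈ pvKids x) : c ∈ l.foldl pvCollectA v := by
  induction l generalizing v with
  | nil => cases hx
  | cons y l ih =>
      rcases List.mem_cons.mp hx with rfl | hx'
      · exact (pvPrefix_foldl_collect l (pvCollectA v x)).subset (pvKids_subset_collect v x hc)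
      · exact ih _ hx'

lemma pvMem_foldl_collect {y : String} {l : List String} {v : PySem.Set String}
    (h : y ∈ l.foldl pvCollectA v) : y ∈ v ∨ ∃ x ∈ l, y ∈ pvKids x := by
  induction l generalizing v with
  | nil => exact Or.inl h
  | cons x l ih =>
      rcases ih (v := pvCollectA v x) h with hv | ⟨z, hz, hy⟩
      · rw [pvCollectA_eq_kids] at hv
        rcases pvMem_of_foldl_add hv with hv | hk
        · exact Or.inl hv
        · exact Or.inr ⟨x, by simp, hk⟩
      · exact Or.inr ⟨z, by simp [hz], hy⟩

lemma pvNodup_foldl_collect (l : List String) (v : PySem.Set String) (hv : v.Nodup) :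
    (l.foldl pvCollectA v).Nodup := by
  induction l generalizing v with
  | nil => exact hv
  | cons x l ih =>
      refine ih _ ?_
      rw [pvCollectA_eq_kids]
      exact pvNodup_foldl_add _ _ hv

lemma pvUpdate_foldl_collect (l : List String) : ∀ v s : PySem.Set String,
    PySem.Set.update v (l.foldl pvCollectA s) = l.foldl pvCollectA (PySem.Set.update v s) := by
  induction l with
  | nil => intro v s; rfl
  | cons x l ih =>
      intro v s
      simp only [List.foldl, ih]
      congr 1
      rw [pvCollectA_eq_kids, pvUpdate_foldl_add, pvCollectA_eq_kids]

lemma pvRound (v : PySem.Set String) :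
    PySem.Set.update v (v.foldl pvCollectA (PySem.Set.empty : PySem.Set String)) =
      v.foldl pvCollectA v := by
  have := pvUpdate_foldl_collect v v (PySem.Set.empty : PySem.Set String)
  simpa [PySem.Set.empty, PySem.Set.update_nil] using this

-- B's round computes the same fold of pvCollectA; nxt is the newly appended tail
lemma pvStepB_fst (st : PySem.Set String × List String) (c : String) :
    (pvStepB st c).1 = PySem.Set.add st.1 c := by
  unfold pvStepB
  have hadd : PySem.Set.add st.1 c =
      if PySem.Set.contains st.1 c then st.1 else st.1 ++ [c] := rfl
  rw [hadd]
  split_ifs <;> rfl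

lemma pvStepB_split {seen : List String} (st : PySem.Set String × List String) (c : String)
    (hst : st.1 = seen ++ st.2) : (pvStepB st c).1 = seen ++ (pvStepB st c).2 := by
  rw [pvStepB]
  split_ifs
  · exact hst
  · simp [hst]

lemma pvInner_inv (l : List String) :
    ∀ (seen : List String) (st : PySem.Set String × List String), st.1 = seen ++ st.2 →
    (l.foldl pvStepB st).1 = l.foldl PySem.Set.add st.1 ∧
      (l.foldl pvStepB st).1 = seen ++ (l.foldl pvStepB st).2 := by
  induction l with
  | nil => intro seen st hst; exact ⟨rfl, hst⟩
  | cons c l ih =>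
      intro seen st hst
      obtain ⟨h1, h2⟩ := ih seen (pvStepB st c) (pvStepB_split st c hst)
      refine ⟨?_, h2⟩
      simp only [List.foldl, h1, pvStepB_fst]

lemma pvOuter_inv (pending : List String) :
    ∀ (seen : List String) (st : PySem.Set String × List String), st.1 = seen ++ st.2 →
    (pending.foldl (fun st title => (pvStripped title).foldl pvStepB st) st).1 =
        pending.foldl pvCollectA st.1 ∧
      (pending.foldl (fun st title => (pvStripped title).foldl pvStepB st) st).1 =
        seen ++ (pending.foldl (fun st title => (pvStripped title).foldl pvStepB st) st).2 := by
  induction pending with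
  | nil => intro seen st hst; exact ⟨rfl, hst⟩
  | cons x l ih =>
      intro seen st hst
      obtain ⟨hi1, hi2⟩ := pvInner_inv (pvStripped x) seen st hst
      obtain ⟨h1, h2⟩ := ih seen _ hi2
      refine ⟨?_, h2⟩
      simp only [List.foldl, h1, hi1]
      rw [pvStripped_eq_kids, ← pvCollectA_eq_kids]

lemma pvRoundB_fst (seen : PySem.Set String) (pending : List String) :
    (pvRoundB seen pending).1 = pending.foldl pvCollectA seen :=
  (pvOuter_inv pending seen (seen, []) (by simp)).1

lemma pvRoundB_snd (seen : PySem.Set String) (pending : List String) :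
    (pvRoundB seen pending).2 = (pending.foldl pvCollectA seen).drop seen.length := by
  obtain ⟨h1, h2⟩ := pvOuter_inv pending seen (seen, []) (by simp)
  have h1' : (pvRoundB seen pending).1 = pending.foldl pvCollectA seen := h1
  have h2' : (pvRoundB seen pending).1 = seen ++ (pvRoundB seen pending).2 := h2
  rw [← h1', h2']
  simp

-- the universe of candidate variants: contiguous substrings of the original title
def pvInU (t x : String) : Prop :=
  ∃ i j : Nat, i ≤ t.toList.length ∧ j ≤ t.toList.length ∧
    x.toList = (t.toList.drop i).take j

lemma pvInU_self (t : String) : pvInU t t :=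
  ⟨0, t.toList.length, Nat.zero_le _, le_refl _, by simp⟩

lemma pvInU_kids {t x c : String} (hx : pvInU t x) (hc : c ∈ pvKids x) : pvInU t c := by
  obtain ⟨i, j, hi, hj, hxl⟩ := hx
  set n := t.toList.length with hn
  have hkid : c.toList = x.toList.drop 4 ∨
      c.toList = x.toList.take (x.toList.length - 9) ∨
      c.toList = x.toList.take (x.toList.length - 8) := by
    simp only [pvKids, List.mem_append] at hc
    have e4 : PySem.List.slice x.toList (some (4 : Int)) none = x.toList.drop 4 := by
      have := PySem.List.slice_from_natCast x.toList 4
      simpa using this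
    have e9 : PySem.List.slice x.toList none (some (-9 : Int)) =
        x.toList.take (x.toList.length - 9) :=
      PySem.List.slice_to_neg_ofNat x.toList 9 (by norm_num)
    have e8 : PySem.List.slice x.toList none (some (-8 : Int)) =
        x.toList.take (x.toList.length - 8) :=
      PySem.List.slice_to_neg_ofNat x.toList 8 (by norm_num)
    rcases hc with h | h | h | h <;> rw [List.mem_ite_nil_right] at h <;>
      obtain ⟨-, h⟩ := h <;> rw [List.mem_singleton] at h <;> subst h <;> simp [e4, e8, e9]
  rcases hkid with h | h | h
  · -- prefix strip: drop 4 more characters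
    rw [hxl, List.drop_take, List.drop_drop] at h
    by_cases hin : i + 4 ≤ n
    · exact ⟨i + 4, j - 4, hin, by omega, h⟩
    · refine ⟨n, 0, le_refl _, Nat.zero_le _, ?_⟩
      rw [h, List.drop_eq_nil_of_le (by omega), List.drop_eq_nil_of_le (by omega)]
      simp
  · rw [hxl, List.take_take] at h
    exact ⟨i, min (((t.toList.drop i).take j).length - 9) j, hi, by omega, h⟩
  · rw [hxl, List.take_take] at h
    exact ⟨i, min (((t.toList.drop i).take j).length - 8) j, hi, by omega, h⟩

def pvUList (t : String) : List String :=
  (List.range (t.toList.length + 1)).flatMap (fun i =>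
    (List.range (t.toList.length + 1)).map (fun j => String.ofList ((t.toList.drop i).take j)))

lemma pvUList_length (t : String) :
    (pvUList t).length = (t.toList.length + 1) * (t.toList.length + 1) := by
  simp [pvUList, List.length_flatMap]

lemma pvMem_UList {t x : String} (h : pvInU t x) : x ∈ pvUList t := by
  obtain ⟨i, j, hi, hj, hxl⟩ := h
  simp only [pvUList, List.mem_flatMap, List.mem_map, List.mem_range]
  refine ⟨i, by omega, j, by omega, ?_⟩
  have : (String.ofList ((t.toList.drop i).take j)).toList = x.toList := by simp [hxl]
  exact String.toList_inj.mp this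

lemma pvCard_bound {t : String} {v : PySem.Set String} (hnd : v.Nodup)
    (hU : ∀ x ∈ v, pvInU t x) :
    v.length ≤ (t.toList.length + 1) * (t.toList.length + 1) := by
  have h1 : v.length = v.toFinset.card := (List.toFinset_card_of_nodup hnd).symm
  have h2 : v.toFinset ⊆ (pvUList t).toFinset := by
    intro y hy
    rw [List.mem_toFinset] at *
    exact pvMem_UList (hU y hy)
  calc v.length = v.toFinset.card := h1
    _ ≤ (pvUList t).toFinset.card := Finset.card_le_card h2
    _ ≤ (pvUList t).length := List.toFinset_card_le _
    _ = _ := pvUList_length t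

-- the main simulation: A's round loop and B's frontier BFS agree from related states
-- (B's pending frontier is exactly the not-yet-expanded tail v.drop prev of A's set)
lemma pvMainBFS (t : String) : ∀ (fa : Nat) (v : PySem.Set String) (prev : Nat),
    v.Nodup → (∀ x ∈ v, pvInU t x) → prev ≤ v.length →
    (∀ p (_ : p < prev) (hpl : p < v.length), ∀ c ∈ pvKids v[p], c ∈ v) →
    (t.toList.length + 1) * (t.toList.length + 1) + 1 ≤ fa + prev →
    pvLoopA fa v prev = pvLoopBFS v (v.drop prev) := by
  intro fa
  induction fa with
  | zero =>
      intro v prev hnd hU hprev _ hfa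
      have := pvCard_bound hnd hU
      omega
  | succ fa ih =>
      intro v prev hnd hU hprev hproc hfa
      have hcard := pvCard_bound hnd hU
      by_cases hstop : v.length = prev
      · have hdrop : v.drop prev = [] := List.drop_eq_nil_of_le (by omega)
        rw [pvLoopA, if_neg (by simp [hstop]), hdrop, pvLoopBFS]
        simp
      · have hlt : prev < v.length := lt_of_le_of_ne hprev (fun h => hstop h.symm)
        obtain ⟨ext, hext⟩ := pvPrefix_foldl_collect (v.drop prev) v
        -- hext : v ++ ext = List.foldl pvCollectA v (v.drop prev)
        have hlv : v.length ≤ (v ++ ext).length := by simp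
        have hid : List.foldl pvCollectA v (v.take prev) = v := by
          apply pvFoldl_collect_of_processed
          intro x hx c hc
          obtain ⟨p, hp, hxp⟩ := List.mem_iff_getElem.mp hx
          have hple : p < prev := by
            have := hp; simp [List.length_take] at this; omega
          have hpv : p < v.length := by omega
          have hgt : (v.take prev)[p]'hp = v[p]'hpv := by
            simp [List.getElem_take]
          subst hxp
          rw [hgt] at hc
          exact hproc p hple hpv c hc
        -- A's step
        have hA : pvLoopA (fa + 1) v prev = pvLoopA fa (v ++ ext) v.length := by
          rw [pvLoopA, if_pos hstop, pvRound]
          congr 1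
          calc List.foldl pvCollectA v v
              = List.foldl pvCollectA v (v.take prev ++ v.drop prev) := by
                rw [List.take_append_drop]
            _ = List.foldl pvCollectA (List.foldl pvCollectA v (v.take prev)) (v.drop prev) :=
                List.foldl_append
            _ = v ++ ext := by rw [hid, ← hext]
        -- B's step
        have hpne : (v.drop prev).isEmpty = false := by
          rw [List.isEmpty_eq_false_iff, ← List.length_pos_iff, List.length_drop]
          omega
        have hB : pvLoopBFS v (v.drop prev) = pvLoopBFS (v ++ ext) ((v ++ ext).drop v.length) := by
          rw [pvLoopBFS, dif_neg (by simp [hpne]), pvRoundB_fst, pvRoundB_snd, ← hext]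
        rw [hA, hB]
        -- re-establish the invariants for the next round
        have hU' : ∀ x ∈ v ++ ext, pvInU t x := by
          intro x hx
          rw [hext] at hx
          rcases pvMem_foldl_collect hx with hxv | ⟨z, hz, hk⟩
          · exact hU x hxv
          · exact pvInU_kids (hU z (List.mem_of_mem_drop hz)) hk
        have hnd' : (v ++ ext).Nodup := by
          rw [hext]
          exact pvNodup_foldl_collect _ _ hnd
        have hproc' : ∀ p (hp : p < v.length) (hpl : p < (v ++ ext).length),
            ∀ c ∈ pvKids (v ++ ext)[p], c ∈ v ++ ext := by
          intro p hp hpl c hc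
          rw [List.getElem_append_left hp] at hc
          by_cases hpp : p < prev
          · exact List.mem_append_left _ (hproc p hpp hp c hc)
          · have hmem : v[p] ∈ v.drop prev := by
              have hpd : p - prev < (v.drop prev).length := by simp; omega
              have : v[p]'hp = (v.drop prev)[p - prev]'hpd := by
                rw [List.getElem_drop]
                congr 1
                omega
              rw [this]
              exact List.getElem_mem _
            rw [hext]
            exact pvFoldlSat v hmem hc
        exact ih (v ++ ext) v.length hnd' hU' hlv hproc' (by omega)

-- ===== VERDICT (by name: the statement is the Claim_ definition above) =====
theorem generate_variant_titles_spec : Claim_equal_generate_variant_titles := by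
  intro t _hdom
  show generate_variant_titles t = generate_variant_titles_alt t
  unfold generate_variant_titles generate_variant_titles_alt
  have h0 : PySem.Set.ofList [t] = [t] :=
    PySem.Set.ofList_eq_self_of_nodup _ (List.nodup_singleton t)
  rw [h0]
  have := pvMainBFS t ((t.toList.length + 1) * (t.toList.length + 1) + 1) [t] 0
    (List.nodup_singleton t)
    (by intro x hx; rw [List.mem_singleton] at hx; subst hx; exact pvInU_self x)
    (by simp)
    (by intro p hp _ c _; exact absurd hp (Nat.not_lt_zero p))
    (by omega)
  simpa using this
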